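-- pv_equiv track=rewrite | github.com/13151294/Minecraft | XP_Calculator.py | XpCal
-- ===== SOURCE A (Python) =====
-- def XpCal(level):
--     Xp = 0
--     Plus = 7
--     PlusAppend = 2
--     k = 3
--     for i in range(level):
--         if i % 15 == 0 and i > 0:
--             PlusAppend += k
--             k += 1
--         Xp += Plus
--         Plus += PlusAppend
--     return Xp
-- ===== SOURCE B (Python) =====
-- def XpCal(level):
--     if level < 0:
--         return 0
--     b, s = divmod(level, 15)
--     return (225*b**4 + 1770*b**3 + 2295*b**2 + 3270*b
--             + s*(60*b**3 + 354*b**2 + 270*b + 144)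
--             + s*s*(6*b**2 + 30*b + 24)) // 24
-- ===== Notes on version B (the rewrite author's own statement) =====
-- stated objective: faster
-- what changed: Replaced the per-level accumulation loop by a closed-form summation of the piecewise-quadratic recurrence: the level is split into complete blocks plus a remainder and the XP is one exact polynomial of those two numbers, followed by a single exact integer division.
import Mathlib
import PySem

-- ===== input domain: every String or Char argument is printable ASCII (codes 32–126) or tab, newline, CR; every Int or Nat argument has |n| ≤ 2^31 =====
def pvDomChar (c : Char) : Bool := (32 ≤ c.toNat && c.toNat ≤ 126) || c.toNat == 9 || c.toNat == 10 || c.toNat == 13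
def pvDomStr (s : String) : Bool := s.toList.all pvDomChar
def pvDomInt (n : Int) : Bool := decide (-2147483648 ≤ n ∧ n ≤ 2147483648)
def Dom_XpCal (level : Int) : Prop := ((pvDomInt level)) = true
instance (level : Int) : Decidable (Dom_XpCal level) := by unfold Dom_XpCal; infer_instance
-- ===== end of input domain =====

-- B replaces A's O(level) loop by an O(1) closed-form polynomial (level = 15*b+s, XP = X(b,s)/24); return values proved equal.

-- ===== PORT A =====
-- the loop body of A: optional bump of (PlusAppend, k), then Xp += Plus, Plus += PlusAppend
def pvBody (st : Int × Int × Int × Int) (i : Int) : Int × Int × Int × Int :=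
  match st with
  | (xp, plus, pa, k) =>
    let pk := if PySem.Int.mod i 15 = 0 ∧ i > 0 then (pa + k, k + 1) else (pa, k)
    (xp + plus, plus + pk.1, pk.1, pk.2)

def XpCal (level : Int) : Int :=
  ((PySem.List.pyRange 0 level 1).foldl pvBody (0, 7, 2, 3)).1

-- ===== PORT B =====
def XpCal_alt (level : Int) : Int :=
  if level < 0 then 0
  else
    let b := PySem.Int.floordiv level 15
    let s := PySem.Int.mod level 15
    PySem.Int.floordiv
      (225*b^4 + 1770*b^3 + 2295*b^2 + 3270*b
        + s*(60*b^3 + 354*b^2 + 270*b + 144)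
        + s*s*(6*b^2 + 30*b + 24)) 24

-- ===== PRECONDITION & SPEC =====
def Spec_XpCal (level : Int) (out : Int) : Prop := out = XpCal_alt level
instance (level : Int) (out : Int) : Decidable (Spec_XpCal level out) := by unfold Spec_XpCal; infer_instance

-- ===== CLAIM (what is proved, stated in full; the proofs are below) =====
def Claim_equal_XpCal : Prop := ∀ (level : Int), Dom_XpCal level → Spec_XpCal level (XpCal level)

-- ===== LEMMAS AND PROOFS =====

-- A's loop as a recursion on the number of completed iterations
def pvG : Nat → Int × Int × Int × Int
  | 0 => (0, 7, 2, 3)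
  | n+1 => pvBody (pvG n) n

-- B's numerator polynomial and the (×12) closed form of the running Plus
def pvX (b s : Int) : Int :=
  225*b^4 + 1770*b^3 + 2295*b^2 + 3270*b
    + s*(60*b^3 + 354*b^2 + 270*b + 144)
    + s*s*(6*b^2 + 30*b + 24)

def pvP (b s : Int) : Int := 30*b^3 + 180*b^2 + 150*b + 84 + s*(6*b^2 + 30*b + 24)

lemma pv_foldl_eq_G (n : Nat) :
    (PySem.List.pyRange 0 (n : Int) 1).foldl pvBody (0, 7, 2, 3) = pvG n := by
  induction n with
  | zero => simp [PySem.List.pyRange_one_eq_nil, pvG]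
  | succ n ih =>
      have h : ((n + 1 : Nat) : Int) = (n : Int) + 1 := by push_cast; ring
      rw [h, PySem.List.pyRange_one_succ_right (by positivity)]
      simp [List.foldl_append, ih, pvG]

-- loop invariant: closed forms (scaled to clear denominators) of the four state components
lemma pv_inv (n : Nat) :
    24 * (pvG n).1 = pvX ((n / 15 : Nat) : Int) ((n % 15 : Nat) : Int)
  ∧ 12 * (pvG n).2.1 = pvP ((n / 15 : Nat) : Int) ((n % 15 : Nat) : Int)
  ∧ 2 * (pvG n).2.2.1 = ((((n - 1) / 15 : Nat) : Int) + 1) * ((((n - 1) / 15 : Nat) : Int) + 4)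
  ∧ (pvG n).2.2.2 = 3 + (((n - 1) / 15 : Nat) : Int) := by
  induction n with
  | zero => norm_num [pvG, pvX, pvP]
  | succ n ih =>
      obtain ⟨hx, hp, ha, hk⟩ := ih
      have hcond : (PySem.Int.mod (n : Int) 15 = 0 ∧ (n : Int) > 0) ↔ (n % 15 = 0 ∧ 0 < n) := by
        rw [show ((15 : Int)) = ((15 : Nat) : Int) by norm_num, PySem.Int.mod_natCast]
        omega
      have hG : pvG (n + 1) = pvBody (pvG n) (n : Int) := rfl
      simp only [pvX, pvP] at hx hp
      by_cases hb : n % 15 = 0 ∧ 0 < n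
      · -- bump step: n is a positive multiple of 15
        have hbi : PySem.Int.mod (n : Int) 15 = 0 ∧ (n : Int) > 0 := hcond.mpr hb
        have e1 : ((n / 15 : Nat) : Int) = (((n - 1) / 15 : Nat) : Int) + 1 := by omega
        have e2 : (((n + 1) / 15 : Nat) : Int) = ((n / 15 : Nat) : Int) := by omega
        have e3 : (((n + 1) % 15 : Nat) : Int) = 1 := by omega
        have e4 : ((((n + 1) - 1) / 15 : Nat) : Int) = ((n / 15 : Nat) : Int) := by omega
        have e5 : ((n % 15 : Nat) : Int) = 0 := by omega
        rw [e5] at hx hp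
        rw [hG, pvBody]
        simp only [hbi, and_self, if_pos]
        refine ⟨?_, ?_, ?_, ?_⟩
        · simp only [pvX]
          rw [e2, e3]
          linear_combination hx + 2 * hp
        · simp only [pvP]
          rw [e2, e3]
          rw [e1] at hp ⊢
          linear_combination hp + 6 * ha + 12 * hk
        · rw [e4, e1]
          linear_combination ha + 2 * hk
        · rw [e4, e1, hk]; ring
      · -- no bump
        have hbi : ¬ (PySem.Int.mod (n : Int) 15 = 0 ∧ (n : Int) > 0) := fun h => hb (hcond.mp h)
        have e4 : ((((n + 1) - 1) / 15 : Nat) : Int) = (((n - 1) / 15 : Nat) : Int) := by omega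
        have eμ : (((n - 1) / 15 : Nat) : Int) = ((n / 15 : Nat) : Int) := by omega
        rw [eμ] at ha
        rw [hG, pvBody]
        simp only [hbi, if_neg, not_false_iff]
        by_cases h14 : n % 15 = 14
        · have eb : (((n + 1) / 15 : Nat) : Int) = ((n / 15 : Nat) : Int) + 1 := by omega
          have es : (((n + 1) % 15 : Nat) : Int) = 0 := by omega
          have es' : ((n % 15 : Nat) : Int) = 14 := by omega
          rw [es'] at hx hp
          refine ⟨?_, ?_, ?_, ?_⟩
          · simp only [pvX]; rw [eb, es]; linear_combination hx + 2 * hp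
          · simp only [pvP]; rw [eb, es]; linear_combination hp + 6 * ha
          · rw [e4, eμ]; exact ha
          · rw [e4]; exact hk
        · have eb : (((n + 1) / 15 : Nat) : Int) = ((n / 15 : Nat) : Int) := by omega
          have es : (((n + 1) % 15 : Nat) : Int) = ((n % 15 : Nat) : Int) + 1 := by omega
          refine ⟨?_, ?_, ?_, ?_⟩
          · simp only [pvX]; rw [eb, es]; linear_combination hx + 2 * hp
          · simp only [pvP]; rw [eb, es]; linear_combination hp + 6 * ha
          · rw [e4, eμ]; exact ha
          · rw [e4]; exact hk

lemma pv_alt_eq (n : Nat) : XpCal_alt (n : Int) = (pvG n).1 := by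
  have hx := (pv_inv n).1
  rw [XpCal_alt]
  rw [if_neg (by omega : ¬ ((n : Int) < 0))]
  simp only
  rw [show ((15 : Int)) = ((15 : Nat) : Int) by norm_num, PySem.Int.floordiv_natCast,
      PySem.Int.mod_natCast]
  rw [show (225*(((n / 15 : Nat)) : Int)^4 + 1770*(((n / 15 : Nat)) : Int)^3 + 2295*(((n / 15 : Nat)) : Int)^2 + 3270*(((n / 15 : Nat)) : Int)
        + (((n % 15 : Nat)) : Int)*(60*(((n / 15 : Nat)) : Int)^3 + 354*(((n / 15 : Nat)) : Int)^2 + 270*(((n / 15 : Nat)) : Int) + 144)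
        + (((n % 15 : Nat)) : Int)*(((n % 15 : Nat)) : Int)*(6*(((n / 15 : Nat)) : Int)^2 + 30*(((n / 15 : Nat)) : Int) + 24))
      = 24 * (pvG n).1 by rw [hx]; simp [pvX]]
  rw [PySem.Int.floordiv_eq_ediv_of_pos (by norm_num)]
  exact Int.mul_ediv_cancel_left _ (by norm_num)

-- ===== VERDICT (by name: the statement is the Claim_ definition above) =====
theorem XpCal_spec : Claim_equal_XpCal := by
  intro level _
  unfold Spec_XpCal
  rcases lt_or_ge level 0 with hneg | hpos
  · rw [XpCal, PySem.List.pyRange_one_eq_nil (by omega), XpCal_alt, if_pos hneg]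
    rfl
  · have h : level = ((level.toNat : Nat) : Int) := by omega
    rw [h, XpCal, pv_foldl_eq_G, pv_alt_eq]
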